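-- pv_equiv track=rewrite | github.com/AlfredoMontero/Code-Jam-2019 | Qualification_Round/Foregone_Solution.py | div_four
-- ===== SOURCE A (Python) =====
-- def div_four(n):
--     m = str(n)
--     l = len(m)
--     a = ''
--     b = ''
--     for k in range(l):
--         if int(m[k]) == 4:
--             a += '2'
--             b += '2'
--         else:
--             a += '0'
--             b += m[k]
--
--     return int(a), int(b)
-- ===== SOURCE B (Python) =====
-- def div_four(n):
--     a = ''
--     b = ''
--     m = n
--     while True:
--         m, d = divmod(m, 10)
--         if d == 4:
--             a = '2' + a
--             b = '2' + b
--         else: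
--             a = '0' + a
--             b = str(d) + b
--         if m == 0:
--             break
--     return int(a), int(b)
-- ===== Notes on version B (the rewrite author's own statement) =====
-- stated objective: alternative
-- what changed: Instead of A's left-to-right indexed pass over str(n) that tests each character with int() and appends to two strings, B never converts n to a string: it extracts the digits numerically right-to-left with divmod(m, 10) in a do-while loop and builds both output strings back-to-front by prepending, deriving each digit character from the numeric digit.
import Mathlib
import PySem

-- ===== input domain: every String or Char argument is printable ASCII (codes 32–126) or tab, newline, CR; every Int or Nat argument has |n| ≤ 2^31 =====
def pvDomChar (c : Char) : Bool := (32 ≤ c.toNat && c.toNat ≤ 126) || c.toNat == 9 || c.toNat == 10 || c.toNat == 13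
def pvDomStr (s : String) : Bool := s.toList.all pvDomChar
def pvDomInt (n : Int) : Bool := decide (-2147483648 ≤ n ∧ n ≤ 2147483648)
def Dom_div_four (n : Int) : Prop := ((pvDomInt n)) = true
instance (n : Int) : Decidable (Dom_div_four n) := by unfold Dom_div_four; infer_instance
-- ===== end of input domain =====

-- B never converts n to a string: it extracts the digits numerically right-to-left with divmod
-- and builds both digit strings back-to-front; objective: alternative, same O(d) cost.


-- ===== PORT A =====
-- Strings are ported on the List Char side (PySem.Chars convention): str(n) is PySem.Int.toChars,
-- int(s) is PySem.Int.ofChars? (none = ValueError, reached only outside Pre_, where .getD 0 stands in).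
def div_four (n : Int) : Int × Int :=
  let m : List Char := PySem.Int.toChars n
  let l : Int := PySem.List.len m
  let ab := (PySem.List.pyRange 0 l 1).foldl
    (fun (ab : List Char × List Char) k =>
      if (PySem.Int.ofChars? [PySem.List.pyGetD m k ' ']).getD 0 = 4 then
        (ab.1 ++ ['2'], ab.2 ++ ['2'])
      else
        (ab.1 ++ ['0'], ab.2 ++ [PySem.List.pyGetD m k ' ']))
    ([], [])
  ((PySem.Int.ofChars? ab.1).getD 0, (PySem.Int.ofChars? ab.2).getD 0)

-- ===== PORT B =====
-- The do-while body of Source B: m, d = divmod(m, 10); prepend to a and b; loop while m != 0.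
-- Python loops forever when m goes negative (only reachable from n < 0, outside Pre_);
-- the recursion condition '0 < q' instead of 'q ≠ 0' is the totality guard for that divergence.
def divFourGo (m : Int) (a b : List Char) : List Char × List Char :=
  let q := PySem.Int.floordiv m 10
  let d := PySem.Int.mod m 10
  let a' := if d = 4 then '2' :: a else '0' :: a
  let b' := if d = 4 then '2' :: b else PySem.Int.toChars d ++ b
  if h : 0 < q then divFourGo q a' b' else (a', b')
termination_by m.toNat
decreasing_by
  have h10 : (10:Int) ≤ m := by
    have := (PySem.Int.le_floordiv_iff_mul_le (a := m) (b := 10) (q := 1) (by norm_num)).1 h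
    omega
  have hq : PySem.Int.floordiv m 10 = m / 10 := PySem.Int.floordiv_eq_ediv_of_pos (by norm_num)
  rw [hq]
  omega

def div_four_alt (n : Int) : Int × Int :=
  let ab := divFourGo n [] []
  ((PySem.Int.ofChars? ab.1).getD 0, (PySem.Int.ofChars? ab.2).getD 0)

-- ===== PRECONDITION & SPEC =====
-- Pre_ excludes exactly the negative n, on which A raises ValueError (int('-') on the sign
-- character) and B's Python loop never terminates.
def Pre_div_four (n : Int) : Prop := 0 ≤ n
instance (n : Int) : Decidable (Pre_div_four n) := by unfold Pre_div_four; infer_instance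
def pvWitness_div_four : Int := 404

def Spec_div_four (n : Int) (out : Int × Int) : Prop := out = div_four_alt n
instance (n : Int) (out : Int × Int) : Decidable (Spec_div_four n out) := by unfold Spec_div_four; infer_instance

-- ===== CLAIM (what is proved, stated in full; the proofs are below) =====
def Claim_equal_div_four : Prop := ∀ (n : Int), Dom_div_four n → Pre_div_four n → Spec_div_four n (div_four n)

-- ===== LEMMAS AND PROOFS =====

-- The per-digit replacements both programs effect on the decimal string of n.
def fA (c : Char) : Char := if c = '4' then '2' else '0'
def fB (c : Char) : Char := if c = '4' then '2' else c

theorem digit_cases (c : Char) (h : c.isDigit = true) :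
    c = '0' ∨ c = '1' ∨ c = '2' ∨ c = '3' ∨ c = '4' ∨ c = '5' ∨ c = '6' ∨ c = '7' ∨ c = '8' ∨ c = '9' := by
  simp only [Char.isDigit, Bool.and_eq_true, decide_eq_true_iff] at h
  obtain ⟨h1, h2⟩ := h
  have hv1 : 48 ≤ c.val.toNat := h1
  have hv2 : c.val.toNat ≤ 57 := h2
  have hc : c = Char.ofNat c.toNat := (Char.ofNat_toNat c).symm
  rw [Char.toNat] at hc
  interval_cases h : c.val.toNat <;> simp_all

theorem per_char (c : Char) (h : c.isDigit = true) :
    ((PySem.Int.ofChars? [c]).getD 0 = 4) ↔ (c = '4') := by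
  rcases digit_cases c h with rfl|rfl|rfl|rfl|rfl|rfl|rfl|rfl|rfl|rfl <;> decide

-- How each program transcribes one numeric digit r (0 ≤ r < 10).
theorem digit_step (r : Nat) (h : r < 10) :
    fA (Nat.digitChar r) = (if (r:Int) = 4 then '2' else '0') ∧
    fB (Nat.digitChar r) = (if (r:Int) = 4 then '2' else Nat.digitChar r) ∧
    PySem.Int.toChars (r:Int) = [Nat.digitChar r] := by
  interval_cases r <;> refine ⟨by decide, by decide, by decide⟩

theorem toDigitsCore_acc (b : Nat) :
    ∀ (f n : Nat) (acc : List Char),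
      Nat.toDigitsCore b f n acc = Nat.toDigitsCore b f n [] ++ acc := by
  intro f
  induction f with
  | zero => intro n acc; simp [Nat.toDigitsCore]
  | succ f ih =>
    intro n acc
    rw [Nat.toDigitsCore, Nat.toDigitsCore]
    by_cases h : n / b = 0
    · simp [h]
    · rw [if_neg h, if_neg h]
      rw [ih (n / b) (Nat.digitChar (n % b) :: acc), ih (n / b) [Nat.digitChar (n % b)]]
      simp

theorem toDigitsCore_fuel (b : Nat) (hb : 2 ≤ b) :
    ∀ (n : Nat), ∀ (f g : Nat), n < f → n < g → ∀ (acc : List Char),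
      Nat.toDigitsCore b f n acc = Nat.toDigitsCore b g n acc := by
  intro n
  induction n using Nat.strong_induction_on with
  | _ n ih =>
    intro f g hf hg acc
    obtain ⟨f', rfl⟩ : ∃ f', f = f' + 1 := ⟨f - 1, by omega⟩
    obtain ⟨g', rfl⟩ : ∃ g', g = g' + 1 := ⟨g - 1, by omega⟩
    rw [Nat.toDigitsCore, Nat.toDigitsCore]
    by_cases h : n / b = 0
    · simp [h]
    · rw [if_neg h, if_neg h]
      have hn0 : 0 < n := by
        rcases Nat.eq_zero_or_pos n with h0 | h0
        · exact absurd (by simp [h0]) h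
        · exact h0
      have hlt : n / b < n := Nat.div_lt_self hn0 (by omega)
      exact ih (n / b) hlt f' g' (by omega) (by omega) _

theorem toDigits_step (k : Nat) (h : 10 ≤ k) :
    Nat.toDigits 10 k = Nat.toDigits 10 (k / 10) ++ [Nat.digitChar (k % 10)] := by
  have h0 : k / 10 ≠ 0 := by omega
  rw [Nat.toDigits, Nat.toDigits]
  rw [Nat.toDigitsCore]
  rw [if_neg h0]
  rw [toDigitsCore_acc 10 k (k / 10) [Nat.digitChar (k % 10)]]
  congr 1
  exact toDigitsCore_fuel 10 (by norm_num) (k / 10)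
    k (k / 10 + 1) (by omega) (by omega) []

theorem toDigits_lt (k : Nat) (h : k < 10) : Nat.toDigits 10 k = [Nat.digitChar k] := by
  rw [Nat.toDigits, Nat.toDigitsCore]
  simp [Nat.div_eq_of_lt h, Nat.mod_eq_of_lt h]

-- B's loop, run from ↑k, prepends exactly the transcribed decimal digits of k.
theorem go_spec (k : Nat) :
    ∀ (a b : List Char),
      divFourGo (k : Int) a b
        = ((Nat.toDigits 10 k).map fA ++ a, (Nat.toDigits 10 k).map fB ++ b) := by
  induction k using Nat.strong_induction_on with
  | _ k ih =>
    intro a b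
    rw [divFourGo]
    have hq : PySem.Int.floordiv (k : Int) 10 = ((k / 10 : Nat) : Int) := by
      exact_mod_cast PySem.Int.floordiv_natCast k 10
    have hd : PySem.Int.mod (k : Int) 10 = ((k % 10 : Nat) : Int) := by
      exact_mod_cast PySem.Int.mod_natCast k 10
    obtain ⟨h1, h2, h3⟩ := digit_step (k % 10) (Nat.mod_lt _ (by norm_num))
    simp only [hq, hd]
    have hc : (((k % 10 : Nat) : Int) = 4) ↔ k % 10 = 4 := by exact_mod_cast Iff.rfl
    simp only [hc] at h1 h2 ⊢
    push_cast at h3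
    by_cases hq0 : 0 < k / 10
    · have hk10 : 10 ≤ k := by omega
      rw [dif_pos (by exact_mod_cast hq0)]
      have hklt : k / 10 < k := Nat.div_lt_self (by omega) (by norm_num)
      rw [ih (k / 10) hklt, toDigits_step k hk10]
      by_cases h4 : k % 10 = 4 <;>
        (simp [h4, h1, h2, h3, List.append_assoc]; try decide)
    · have hk : k < 10 := by omega
      rw [dif_neg (by exact_mod_cast hq0)]
      rw [toDigits_lt k hk]
      rw [Nat.mod_eq_of_lt hk] at h1 h2 h3 hc ⊢
      have hmod : ((k : Int) % 10) = (k : Int) := by omega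
      rw [hmod] at h3
      by_cases h4 : k = 4 <;>
        (simp [h4, h1, h2, h3]; try decide)

-- A's indexed foldl over str(n) produces exactly the two mapped digit strings.
theorem A_eval (n : Int) (h0 : 0 ≤ n) :
    div_four n = ((PySem.Int.ofChars? ((PySem.Int.toChars n).map fA)).getD 0,
                  (PySem.Int.ofChars? ((PySem.Int.toChars n).map fB)).getD 0) := by
  have hdig : ∀ c ∈ PySem.Int.toChars n, c.isDigit = true := by
    intro c hc
    rw [PySem.Int.toChars, if_neg (not_lt.2 h0)] at hc
    exact Nat.isDigit_of_mem_toDigits (by norm_num) (by norm_num) hc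
  rw [div_four]
  have h1 := PySem.List.foldl_pyRange_zero_pyGetD (xs := PySem.Int.toChars n) (d := ' ')
      (f := fun (ab : List Char × List Char) c =>
        if (PySem.Int.ofChars? [c]).getD 0 = 4 then (ab.1 ++ ['2'], ab.2 ++ ['2'])
        else (ab.1 ++ ['0'], ab.2 ++ [c])) (init := (([] : List Char), ([] : List Char)))
  simp only [] at h1 ⊢
  rw [h1]
  have h2 : List.foldl
      (fun (ab : List Char × List Char) c =>
        if (PySem.Int.ofChars? [c]).getD 0 = 4 then (ab.1 ++ ['2'], ab.2 ++ ['2'])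
        else (ab.1 ++ ['0'], ab.2 ++ [c]))
      ([], []) (PySem.Int.toChars n)
      = ((PySem.Int.toChars n).map fA, (PySem.Int.toChars n).map fB) := by
    have hcg := PySem.List.foldl_congr_mem
      (l := PySem.Int.toChars n) (init := (([] : List Char), ([] : List Char)))
      (f := fun (ab : List Char × List Char) c =>
        if (PySem.Int.ofChars? [c]).getD 0 = 4 then (ab.1 ++ ['2'], ab.2 ++ ['2'])
        else (ab.1 ++ ['0'], ab.2 ++ [c]))
      (g := fun (ab : List Char × List Char) c =>
        ((fun (x : List Char) (c : Char) => x ++ [fA c]) ab.1 c,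
         (fun (x : List Char) (c : Char) => x ++ [fB c]) ab.2 c))
      (by
        intro acc c hc
        dsimp only
        by_cases h4 : c = '4'
        · rw [if_pos ((per_char c (hdig c hc)).2 h4)]
          simp [fA, fB, h4]
        · rw [if_neg (fun hx => h4 ((per_char c (hdig c hc)).1 hx))]
          simp [fA, fB, h4])
    rw [hcg]
    rw [PySem.List.foldl_prod_mk
      (f := fun (x : List Char) (c : Char) => x ++ [fA c])
      (g := fun (x : List Char) (c : Char) => x ++ [fB c])]
    rw [PySem.List.foldl_append_singleton_eq_map, PySem.List.foldl_append_singleton_eq_map]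
    simp
  rw [h2]

theorem main_eq (n : Int) (h0 : 0 ≤ n) : div_four n = div_four_alt n := by
  rw [A_eval n h0, div_four_alt]
  have hn : (n.toNat : Int) = n := Int.toNat_of_nonneg h0
  have hgo := go_spec n.toNat [] []
  rw [hn] at hgo
  have hts : PySem.Int.toChars n = Nat.toDigits 10 n.toNat := by
    rw [PySem.Int.toChars, if_neg (not_lt.2 h0)]
  simp only [hgo, hts, List.append_nil]

-- ===== VERDICT (by name: the statement is the Claim_ definition above) =====
theorem div_four_spec : Claim_equal_div_four := by
  intro n _ hpre
  unfold Spec_div_four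
  exact main_eq n hpre
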